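-- pv_equiv track=rewrite | github.com/DionGR/university-projects | Semester_1/Python/Matching Card Game/matchingame.py | deckcheck
-- ===== SOURCE A (Python) =====
-- def deckcheck(flatdeckwithx, xdeck): # Ελέγχει εαν υπάρχουν δυνατοί συνδυασμοί στο deckwithx. Εαν όχι, επιστρέφει False.
--     xdeck = [j for k in xdeck for j in k] # Kάνει flatten το xdeck έτσι ώστε να γίνει ευκολότερα ο έλεγχος.
--     checkdeck = [xdeck[i] for i in range(len(flatdeckwithx)) if flatdeckwithx[i] == " X  "] # Δημιουργεί ένα νέο checkdeck το οποίο περιέχει τις κάρτες που δεν εχουν γυρίσει.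
--     for j in range(len(checkdeck)): # Eλέγχει εαν υπαρχουν συνδυασμοι βασει του αριθμου και του συμβολου.
--         for k in range(j, len(checkdeck)):
--             if checkdeck[j] != checkdeck[k]:
--                 if checkdeck[j][1:2] == checkdeck[k][1:2] or checkdeck[j][3:4] == checkdeck[k][3:4]:
--                     return True
--     return False
-- ===== SOURCE B (Python) =====
-- def deckcheck(flatdeckwithx, xdeck):
--     flat = [j for k in xdeck for j in k]
--     checkdeck = [flat[i] for i in range(len(flatdeckwithx)) if flatdeckwithx[i] == " X  "]
--     uniq = list(dict.fromkeys(checkdeck))          # distinct unturned cards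
--     ranks = [c[1:2] for c in uniq]
--     syms = [c[3:4] for c in uniq]
--     return len(set(ranks)) < len(ranks) or len(set(syms)) < len(syms)
-- ===== Notes on version B (the rewrite author's own statement) =====
-- stated objective: alternative
-- what changed: Replaced A's nested all-pairs scan over checkdeck with a duplicate-key test: deduplicate the unturned cards (dict.fromkeys), project them to their rank and symbol characters, and report a match iff either projection contains a duplicate (len(set(..)) < len(..)).
import Mathlib
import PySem

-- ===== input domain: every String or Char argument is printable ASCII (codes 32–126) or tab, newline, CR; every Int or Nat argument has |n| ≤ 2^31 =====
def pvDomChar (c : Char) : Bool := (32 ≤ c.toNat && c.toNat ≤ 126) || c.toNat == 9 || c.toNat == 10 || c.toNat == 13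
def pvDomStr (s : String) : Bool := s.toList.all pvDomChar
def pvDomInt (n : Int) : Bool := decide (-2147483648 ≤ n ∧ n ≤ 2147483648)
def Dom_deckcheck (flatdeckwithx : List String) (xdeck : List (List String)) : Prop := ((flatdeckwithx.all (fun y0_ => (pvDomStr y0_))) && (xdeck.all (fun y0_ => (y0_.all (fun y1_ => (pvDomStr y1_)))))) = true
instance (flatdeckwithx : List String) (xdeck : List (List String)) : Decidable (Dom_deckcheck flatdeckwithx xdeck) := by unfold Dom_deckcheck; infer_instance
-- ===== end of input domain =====

-- B replaces A's nested all-pairs scan by deduplicating the unturned cards and checking each of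
-- the two key projections (rank char, symbol char) for a duplicate.

-- ===== PORT A =====
-- card[1:2] and card[3:4], as lists of characters (Python string slices; comparison by = is Python ==)
def pvRank (s : String) : List Char := PySem.List.slice s.toList (some 1) (some 2)
def pvSym (s : String) : List Char := PySem.List.slice s.toList (some 3) (some 4)

-- the two lines A and B share verbatim: flatten is done by the caller (xdeck.flatten); this is
-- '[xdeck[i] for i in range(len(flatdeckwithx)) if flatdeckwithx[i] == " X  "]'.
-- Under Pre_deckcheck every accessed index is in range, so getD's default is never used.
def pvCheckdeck (flatdeckwithx flat : List String) : List String :=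
  (List.range flatdeckwithx.length).filterMap (fun i =>
    if flatdeckwithx.getD i "" = " X  " then some (flat.getD i "") else none)

-- A's nested loops: j over indices, k from j on; early return True on the first hit.
def pvScanA : List String → Bool
  | [] => false
  | c :: rest =>
    if (c :: rest).any (fun k => c != k && (pvRank c == pvRank k || pvSym c == pvSym k))
    then true else pvScanA rest

def deckcheck (flatdeckwithx : List String) (xdeck : List (List String)) : Bool :=
  pvScanA (pvCheckdeck flatdeckwithx xdeck.flatten)

-- ===== PORT B =====
-- len(set(l)) < len(l)
def pvHasDup (l : List (List Char)) : Bool :=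
  decide ((PySem.Set.ofList l).length < l.length)

def deckcheck_alt (flatdeckwithx : List String) (xdeck : List (List String)) : Bool :=
  let uniq := PySem.List.dedup (pvCheckdeck flatdeckwithx xdeck.flatten)  -- list(dict.fromkeys(checkdeck))
  pvHasDup (uniq.map pvRank) || pvHasDup (uniq.map pvSym)

-- ===== PRECONDITION & SPEC =====
-- Pre_ excludes exactly the inputs where A raises IndexError: some position marked " X  " in
-- flatdeckwithx lies beyond the flattened xdeck (B raises the same way there).
def Pre_deckcheck (flatdeckwithx : List String) (xdeck : List (List String)) : Prop :=
  ∀ i < flatdeckwithx.length, flatdeckwithx.getD i "" = " X  " → i < xdeck.flatten.length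
instance (flatdeckwithx : List String) (xdeck : List (List String)) : Decidable (Pre_deckcheck flatdeckwithx xdeck) := by unfold Pre_deckcheck; infer_instance

def pvWitness_deckcheck : List String × List (List String) :=
  ([" X  ", "[1-S]", " X  "], [["[2-H]", "[5-S]"], ["[2-D]"]])

def Spec_deckcheck (flatdeckwithx : List String) (xdeck : List (List String)) (out : Bool) : Prop := out = deckcheck_alt flatdeckwithx xdeck
instance (flatdeckwithx : List String) (xdeck : List (List String)) (out : Bool) : Decidable (Spec_deckcheck flatdeckwithx xdeck out) := by unfold Spec_deckcheck; infer_instance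

-- ===== CLAIM (what is proved, stated in full; the proofs are below) =====
def Claim_equal_deckcheck : Prop := ∀ (flatdeckwithx : List String) (xdeck : List (List String)), Dom_deckcheck flatdeckwithx xdeck → Pre_deckcheck flatdeckwithx xdeck → Spec_deckcheck flatdeckwithx xdeck (deckcheck flatdeckwithx xdeck)

-- ===== LEMMAS AND PROOFS =====

-- 'there are two distinct cards in c with the same key'
def PvPair (f : String → List Char) (c : List String) : Prop :=
  ∃ a ∈ c, ∃ b ∈ c, f a = f b ∧ a ≠ b

lemma pvScanA_iff_ex : ∀ (c : List String), pvScanA c = true ↔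
    ∃ a ∈ c, ∃ b ∈ c, a ≠ b ∧ (pvRank a = pvRank b ∨ pvSym a = pvSym b)
  | [] => by simp [pvScanA]
  | x :: r => by
    have ih := pvScanA_iff_ex r
    have hcond : (((x :: r).any (fun k => x != k && (pvRank x == pvRank k || pvSym x == pvSym k))) = true)
        ↔ ∃ k ∈ x :: r, x ≠ k ∧ (pvRank x = pvRank k ∨ pvSym x = pvSym k) := by
      simp [List.any_eq_true]
    by_cases hx : ∃ k ∈ x :: r, x ≠ k ∧ (pvRank x = pvRank k ∨ pvSym x = pvSym k)
    · refine iff_of_true ?_ ?_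
      · simp only [pvScanA]; rw [if_pos (hcond.mpr hx)]
      · rcases hx with ⟨k, hk, hne, hkey⟩
        exact ⟨x, List.mem_cons_self, k, hk, hne, hkey⟩
    · have hstep : pvScanA (x :: r) = pvScanA r := by
        simp only [pvScanA]; rw [if_neg (fun h => hx (hcond.mp h))]
      rw [hstep, ih]
      constructor
      · rintro ⟨a, ha, b, hb, hne, hkey⟩
        exact ⟨a, List.mem_cons_of_mem _ ha, b, List.mem_cons_of_mem _ hb, hne, hkey⟩
      · rintro ⟨a, ha, b, hb, hne, hkey⟩
        rcases List.mem_cons.mp ha with rfl | ha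
        · exact absurd ⟨b, hb, hne, hkey⟩ hx
        · rcases List.mem_cons.mp hb with rfl | hb
          · refine absurd ⟨a, ?_, Ne.symm hne, ?_⟩ hx
            · exact ha
            rcases hkey with hk | hk
            · exact Or.inl hk.symm
            · exact Or.inr hk.symm
          · exact ⟨a, ha, b, hb, hne, hkey⟩

lemma pvScanA_iff (c : List String) :
    pvScanA c = true ↔ PvPair pvRank c ∨ PvPair pvSym c := by
  rw [pvScanA_iff_ex]
  unfold PvPair
  constructor
  · rintro ⟨a, ha, b, hb, hne, hk | hk⟩
    · exact Or.inl ⟨a, ha, b, hb, hk, hne⟩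
    · exact Or.inr ⟨a, ha, b, hb, hk, hne⟩
  · rintro (⟨a, ha, b, hb, hk, hne⟩ | ⟨a, ha, b, hb, hk, hne⟩)
    · exact ⟨a, ha, b, hb, hne, Or.inl hk⟩
    · exact ⟨a, ha, b, hb, hne, Or.inr hk⟩

lemma foldl_add_sublist {α : Type} [BEq α] :
    ∀ (xs s pre : List α), List.Sublist s pre → List.Sublist (xs.foldl PySem.Set.add s) (pre ++ xs)
  | [], s, pre, h => by simpa using h
  | x :: xs, s, pre, h => by
    have h1 : List.Sublist (PySem.Set.add s x) (pre ++ [x]) := by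
      unfold PySem.Set.add
      split
      · exact h.trans (List.sublist_append_left _ _)
      · exact h.append (List.Sublist.refl [x])
    have h2 := foldl_add_sublist xs (PySem.Set.add s x) (pre ++ [x]) h1
    simpa [List.append_assoc] using h2

lemma ofList_sublist {α : Type} [BEq α] (xs : List α) : List.Sublist (PySem.Set.ofList xs) xs := by
  simpa [PySem.Set.ofList, PySem.Set.empty] using foldl_add_sublist xs [] [] (List.Sublist.refl [])

lemma pvHasDup_iff (l : List (List Char)) : pvHasDup l = true ↔ ¬ l.Nodup := by
  unfold pvHasDup
  simp only [decide_eq_true_eq]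
  constructor
  · intro hlt hnd
    rw [PySem.Set.ofList_eq_self_of_nodup l hnd] at hlt
    omega
  · intro hnd
    have hle := PySem.Set.length_ofList_le l
    rcases lt_or_eq_of_le hle with h | h
    · exact h
    · exact absurd ((ofList_sublist l).eq_of_length h ▸ PySem.Set.nodup_ofList l) hnd

lemma pvHasDup_dedup_iff (f : String → List Char) (c : List String) :
    pvHasDup ((PySem.List.dedup c).map f) = true ↔ PvPair f c := by
  rw [pvHasDup_iff, List.nodup_map_iff_inj_on (PySem.List.nodup_dedup c)]
  unfold PvPair
  push Not
  constructor
  · rintro ⟨a, ha, b, hb, hk, hne⟩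
    exact ⟨a, (PySem.List.mem_dedup c a).mp ha, b, (PySem.List.mem_dedup c b).mp hb, hk, hne⟩
  · rintro ⟨a, ha, b, hb, hk, hne⟩
    exact ⟨a, (PySem.List.mem_dedup c a).mpr ha, b, (PySem.List.mem_dedup c b).mpr hb, hk, hne⟩

lemma deckcheck_eq_alt (flatdeckwithx : List String) (xdeck : List (List String)) :
    deckcheck flatdeckwithx xdeck = deckcheck_alt flatdeckwithx xdeck := by
  unfold deckcheck deckcheck_alt
  rw [Bool.eq_iff_iff]
  simp only [Bool.or_eq_true]
  rw [pvScanA_iff, pvHasDup_dedup_iff, pvHasDup_dedup_iff]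

-- ===== VERDICT (by name: the statement is the Claim_ definition above) =====
theorem deckcheck_spec : Claim_equal_deckcheck := by
  intro flatdeckwithx xdeck _ _
  unfold Spec_deckcheck
  exact deckcheck_eq_alt flatdeckwithx xdeck
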